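-- pv_equiv track=rewrite | github.com/rlavanya9/cracking-the-coding-interview | arraystring/overlap.py | embolden_substrings
-- ===== SOURCE A (Python) =====
-- def embolden_substrings(mystr, substr):
--     array_idx = [False] * len(mystr)
--     for idx in range(len(mystr)):
--         for text in substr:
--             if mystr[idx:].startswith(text):
--                 for size in range(len(text)):
--                     array_idx[idx + size] = True
--
--     result = ""
--     bold_tag = "<b>"
--     bold_end = "</b>"
--     bold = False
--     # bold_e = False
--     for i , set_flag  in enumerate(array_idx):
--
--         if set_flag:
--             if not bold:
--                 result += bold_tag
--                 bold = True
--                 # bold_e = False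
--         else:
--               if bold:
--             # if bold_e != True:
--                 result += bold_end
--                 # bold_e = True
--                 bold = False
--
--
--         result += mystr[i]
--
--     if bold:
--         result += bold_end
--     return result
-- ===== SOURCE B (Python) =====
-- def embolden_substrings(mystr, substr):
--     # Per-substring: enumerate occurrences with str.find (C speed), mark covered
--     # ranges in a bitmap, then emit <b>...</b> runs in one pass over zip().
--     n = len(mystr)
--     mask = [False] * n
--     for text in substr:
--         if not text:
--             continue
--         pos = mystr.find(text)
--         while pos != -1:
--             for k in range(pos, pos + len(text)):
--                 mask[k] = True
--             pos = mystr.find(text, pos + 1)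
--     parts = []
--     bold = False
--     for flag, ch in zip(mask, mystr):
--         if flag and not bold:
--             parts.append("<b>")
--             bold = True
--         elif not flag and bold:
--             parts.append("</b>")
--             bold = False
--         parts.append(ch)
--     if bold:
--         parts.append("</b>")
--     return "".join(parts)
-- ===== Notes on version B (the rewrite author's own statement) =====
-- stated objective: faster
-- what changed: Replaces A's per-index scan (test every substring at every position, re-marking each covered range) by a per-substring str.find occurrence scan that marks ranges into the mask, then emits the <b>...</b> runs in a single zip pass.
import Mathlib
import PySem

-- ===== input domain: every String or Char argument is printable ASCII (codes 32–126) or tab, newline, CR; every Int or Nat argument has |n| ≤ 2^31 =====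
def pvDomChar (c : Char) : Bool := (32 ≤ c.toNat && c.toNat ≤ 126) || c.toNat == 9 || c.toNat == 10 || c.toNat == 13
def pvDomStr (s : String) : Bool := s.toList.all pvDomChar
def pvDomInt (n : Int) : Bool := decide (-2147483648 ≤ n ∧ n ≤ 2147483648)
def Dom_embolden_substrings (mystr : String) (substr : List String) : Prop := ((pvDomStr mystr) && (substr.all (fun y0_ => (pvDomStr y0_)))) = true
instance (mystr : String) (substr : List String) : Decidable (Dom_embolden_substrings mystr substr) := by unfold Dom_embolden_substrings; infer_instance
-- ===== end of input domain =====

-- B replaces A's per-index triple-nested mask marking by a per-substring str.find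
-- occurrence scan; measurably faster by a constant factor (fewer startswith probes).

-- ===== PORT A =====
-- A builds a boolean mask by looping over every index, every substring, and every
-- covered offset, then emits <b>…</b> runs in a second pass.
-- `mystr[idx:]` is ported as List.drop (0 ≤ idx ≤ len, where drop is exact) and
-- `mystr[i]` as pyGetD (i < len array_idx = len mystr, so always in range);
-- `array_idx[idx+size] = True` as List.set (idx+size < len whenever startswith holds).
def pvMaskA (s : List Char) (substr : List String) : List Bool :=
  (PySem.List.pyRange 0 (s.length : Int) 1).foldl (fun arr idx =>
    substr.foldl (fun arr text =>
      if PySem.Chars.startswith (List.drop idx.toNat s) text.toList then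
        (PySem.List.pyRange 0 (text.toList.length : Int) 1).foldl
          (fun a size => a.set (idx + size).toNat true) arr
      else arr) arr)
    (List.replicate s.length false)

def pvEmitStepA (s : List Char) (acc : List Char × Bool) (pr : Int × Bool) : List Char × Bool :=
  if pr.2 then
    let acc' := if !acc.2 then (acc.1 ++ ('<' :: 'b' :: '>' :: []), true) else acc
    (acc'.1 ++ [PySem.List.pyGetD s pr.1 ' '], acc'.2)
  else
    let acc' := if acc.2 then (acc.1 ++ ('<' :: '/' :: 'b' :: '>' :: []), false) else acc
    (acc'.1 ++ [PySem.List.pyGetD s pr.1 ' '], acc'.2)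

def embolden_substrings (mystr : String) (substr : List String) : String :=
  let s := mystr.toList
  let fin := (PySem.List.enumerate (pvMaskA s substr) 0).foldl (pvEmitStepA s) ([], false)
  String.ofList (if fin.2 then fin.1 ++ ('<' :: '/' :: 'b' :: '>' :: []) else fin.1)

-- ===== PORT B =====
-- B: for each substring, enumerate its occurrences with find / find-from (the while
-- loop, with fuel s.length+1: occurrence positions strictly increase and stay below
-- len(s), so the fuel is never exhausted), mark each covered range in the mask, then
-- emit runs in one pass over zip(mask, mystr).
def pvMarkLoop (s t : List Char) : Nat → Int → List Bool → List Bool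
  | 0, _, arr => arr
  | fuel+1, pos, arr =>
    if pos = -1 then arr
    else
      pvMarkLoop s t fuel (PySem.Chars.findFrom s t (pos + 1) none)
        ((PySem.List.pyRange pos (pos + (t.length : Int)) 1).foldl
          (fun a k => a.set k.toNat true) arr)

def pvMaskB (s : List Char) (substr : List String) : List Bool :=
  substr.foldl (fun mask text =>
    if text.toList = [] then mask
    else pvMarkLoop s text.toList (s.length + 1) (PySem.Chars.find s text.toList) mask)
    (List.replicate s.length false)

def pvEmitStepB (acc : List Char × Bool) (pr : Bool × Char) : List Char × Bool :=
  if pr.1 && !acc.2 then (acc.1 ++ ('<' :: 'b' :: '>' :: []) ++ [pr.2], true)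
  else if !pr.1 && acc.2 then (acc.1 ++ ('<' :: '/' :: 'b' :: '>' :: []) ++ [pr.2], false)
  else (acc.1 ++ [pr.2], acc.2)

def embolden_substrings_alt (mystr : String) (substr : List String) : String :=
  let s := mystr.toList
  let fin := (List.zip (pvMaskB s substr) s).foldl pvEmitStepB ([], false)
  String.ofList (if fin.2 then fin.1 ++ ('<' :: '/' :: 'b' :: '>' :: []) else fin.1)

-- ===== PRECONDITION & SPEC =====
def Spec_embolden_substrings (mystr : String) (substr : List String) (out : String) : Prop := out = embolden_substrings_alt mystr substr
instance (mystr : String) (substr : List String) (out : String) : Decidable (Spec_embolden_substrings mystr substr out) := by unfold Spec_embolden_substrings; infer_instance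

-- ===== CLAIM (what is proved, stated in full; the proofs are below) =====
def Claim_equal_embolden_substrings : Prop := ∀ (mystr : String) (substr : List String), Dom_embolden_substrings mystr substr → Spec_embolden_substrings mystr substr (embolden_substrings mystr substr)

-- ===== LEMMAS AND PROOFS =====

lemma pvMarkLoop_succ (s t : List Char) (fuel : Nat) (pos : Int) (arr : List Bool) :
    pvMarkLoop s t (fuel + 1) pos arr
      = if pos = -1 then arr
        else pvMarkLoop s t fuel (PySem.Chars.findFrom s t (pos + 1) none)
              ((PySem.List.pyRange pos (pos + (t.length : Int)) 1).foldl
                (fun a k => a.set k.toNat true) arr) := rfl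


-- l[i] is set, read through getElem?/getD (false out of range)
def pvG (l : List Bool) (i : Nat) : Prop := l[i]?.getD false = true

-- position i is covered by some occurrence of some listed substring
def pvCov (s : List Char) (substr : List String) (i : Nat) : Prop :=
  ∃ t ∈ substr, ∃ p : Nat,
    t.toList <+: List.drop p s ∧ p ≤ i ∧ i < p + t.toList.length

lemma pv_foldl_length {α : Type} (l : List α) (f : List Bool → α → List Bool)
    (h : ∀ a x, (f a x).length = a.length) :
    ∀ arr, (l.foldl f arr).length = arr.length := by
  induction l with
  | nil => intro arr; rfl
  | cons x xs ih => intro arr; rw [List.foldl_cons, ih, h]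

lemma pvG_set_true (arr : List Bool) (n i : Nat) :
    pvG (arr.set n true) i ↔ pvG arr i ∨ (n = i ∧ i < arr.length) := by
  unfold pvG
  rw [List.getElem?_set]
  by_cases h : n = i
  · subst h
    by_cases hlt : n < arr.length
    · simp [hlt]
    · simp [hlt]
  · simp [h]

lemma pvG_setRangeA (arr : List Bool) (idx : Int) (h0 : 0 ≤ idx) (L : Nat)
    (hL : idx.toNat + L ≤ arr.length) (i : Nat) :
    pvG ((PySem.List.pyRange 0 (L : Int) 1).foldl
          (fun a size => a.set (idx + size).toNat true) arr) i
      ↔ pvG arr i ∨ (idx.toNat ≤ i ∧ i < idx.toNat + L) := by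
  induction L with
  | zero =>
    rw [Nat.cast_zero, PySem.List.pyRange_one_eq_nil le_rfl]
    simp only [List.foldl_nil]
    constructor
    · exact Or.inl
    · rintro (h | ⟨_, h2⟩)
      · exact h
      · omega
  | succ L ih =>
    rw [Nat.cast_add, Nat.cast_one,
        PySem.List.pyRange_one_succ_right (by positivity), List.foldl_append,
        List.foldl_cons, List.foldl_nil, pvG_set_true,
        ih (by omega),
        pv_foldl_length _ _ (fun a k => by simp)]
    constructor
    · rintro ((h | ⟨h1, h2⟩) | ⟨h1, _⟩)
      · exact Or.inl h
      · exact Or.inr ⟨h1, by omega⟩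
      · exact Or.inr ⟨by omega, by omega⟩
    · rintro (h | ⟨h1, h2⟩)
      · exact Or.inl (Or.inl h)
      · by_cases hc : i < idx.toNat + L
        · exact Or.inl (Or.inr ⟨h1, hc⟩)
        · exact Or.inr ⟨by omega, by omega⟩

lemma pvG_setRangeB (arr : List Bool) (pos : Int) (h0 : 0 ≤ pos) (L : Nat)
    (hL : pos.toNat + L ≤ arr.length) (i : Nat) :
    pvG ((PySem.List.pyRange pos (pos + (L : Int)) 1).foldl
          (fun a k => a.set k.toNat true) arr) i
      ↔ pvG arr i ∨ (pos.toNat ≤ i ∧ i < pos.toNat + L) := by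
  induction L with
  | zero =>
    rw [Nat.cast_zero, add_zero, PySem.List.pyRange_one_eq_nil le_rfl]
    simp only [List.foldl_nil]
    constructor
    · exact Or.inl
    · rintro (h | ⟨_, h2⟩)
      · exact h
      · omega
  | succ L ih =>
    rw [Nat.cast_add, Nat.cast_one, ← add_assoc,
        PySem.List.pyRange_one_succ_right (by omega), List.foldl_append,
        List.foldl_cons, List.foldl_nil, pvG_set_true,
        ih (by omega),
        pv_foldl_length _ _ (fun a k => by simp)]
    constructor
    · rintro ((h | ⟨h1, h2⟩) | ⟨h1, _⟩)
      · exact Or.inl h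
      · exact Or.inr ⟨h1, by omega⟩
      · exact Or.inr ⟨by omega, by omega⟩
    · rintro (h | ⟨h1, h2⟩)
      · exact Or.inl (Or.inl h)
      · by_cases hc : i < pos.toNat + L
        · exact Or.inl (Or.inr ⟨h1, hc⟩)
        · exact Or.inr ⟨by omega, by omega⟩

lemma pvG_stepA (s : List Char) (substr : List String) (idx : Int) (h0 : 0 ≤ idx)
    (hq : idx.toNat ≤ s.length)
    (arr : List Bool) (hlen : arr.length = s.length) (i : Nat) :
    pvG (substr.foldl (fun arr text =>
          if PySem.Chars.startswith (List.drop idx.toNat s) text.toList then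
            (PySem.List.pyRange 0 (text.toList.length : Int) 1).foldl
              (fun a size => a.set (idx + size).toNat true) arr
          else arr) arr) i
      ↔ pvG arr i ∨ ∃ t ∈ substr, t.toList <+: List.drop idx.toNat s ∧
          idx.toNat ≤ i ∧ i < idx.toNat + t.toList.length := by
  induction substr generalizing arr with
  | nil => simp
  | cons t ts ih =>
    rw [List.foldl_cons]
    by_cases hs : PySem.Chars.startswith (List.drop idx.toNat s) t.toList
    · have hpre := (PySem.Chars.startswith_iff _ _).mp hs
      have hL : idx.toNat + t.toList.length ≤ arr.length := by
        have h1 := hpre.length_le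
        rw [List.length_drop] at h1
        omega
      rw [if_pos hs,
          ih _ (by rw [pv_foldl_length _ _ (fun a k => by simp)]; exact hlen),
          pvG_setRangeA arr idx h0 _ hL]
      constructor
      · rintro ((h | ⟨h1, h2⟩) | ⟨u, hu, hcond⟩)
        · exact Or.inl h
        · exact Or.inr ⟨t, by simp, hpre, h1, h2⟩
        · exact Or.inr ⟨u, List.mem_cons_of_mem _ hu, hcond⟩
      · rintro (h | ⟨u, hu, hcond⟩)
        · exact Or.inl (Or.inl h)
        · rcases List.mem_cons.mp hu with rfl | hu'
          · exact Or.inl (Or.inr ⟨hcond.2.1, hcond.2.2⟩)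
          · exact Or.inr ⟨u, hu', hcond⟩
    · rw [if_neg hs, ih _ hlen]
      constructor
      · rintro (h | ⟨u, hu, hcond⟩)
        · exact Or.inl h
        · exact Or.inr ⟨u, List.mem_cons_of_mem _ hu, hcond⟩
      · rintro (h | ⟨u, hu, hcond⟩)
        · exact Or.inl h
        · rcases List.mem_cons.mp hu with rfl | hu'
          · exact absurd ((PySem.Chars.startswith_iff _ _).mpr hcond.1) hs
          · exact Or.inr ⟨u, hu', hcond⟩

lemma pvMaskA_len_aux (s : List Char) (substr : List String) (idx : Int) (arr : List Bool) :
    (substr.foldl (fun arr text =>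
        if PySem.Chars.startswith (List.drop idx.toNat s) text.toList then
          (PySem.List.pyRange 0 (text.toList.length : Int) 1).foldl
            (fun a size => a.set (idx + size).toNat true) arr
        else arr) arr).length = arr.length := by
  apply pv_foldl_length
  intro a t
  by_cases h : PySem.Chars.startswith (List.drop idx.toNat s) t.toList
  · simp only [h, if_true]
    exact pv_foldl_length _ _ (fun a k => by simp) a
  · simp [h]

lemma pvG_maskA_aux (s : List Char) (substr : List String) :
    ∀ (m : Nat), m ≤ s.length → ∀ (arr : List Bool), arr.length = s.length → ∀ i,
    (pvG ((PySem.List.pyRange 0 (m : Int) 1).foldl (fun arr idx =>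
        substr.foldl (fun arr text =>
          if PySem.Chars.startswith (List.drop idx.toNat s) text.toList then
            (PySem.List.pyRange 0 (text.toList.length : Int) 1).foldl
              (fun a size => a.set (idx + size).toNat true) arr
          else arr) arr) arr) i
      ↔ pvG arr i ∨ ∃ q : Nat, q < m ∧ ∃ t ∈ substr,
          t.toList <+: List.drop q s ∧ q ≤ i ∧ i < q + t.toList.length) := by
  intro m
  induction m with
  | zero =>
    intro _ arr _ i
    rw [Nat.cast_zero, PySem.List.pyRange_one_eq_nil le_rfl]
    simp
  | succ m ih =>
    intro hm arr hlen i
    rw [Nat.cast_add, Nat.cast_one, PySem.List.pyRange_one_succ_right (by positivity),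
        List.foldl_append, List.foldl_cons, List.foldl_nil,
        pvG_stepA s substr (m : Int) (by positivity)
          (by rw [Int.toNat_natCast]; omega) _
          (by exact (pv_foldl_length _ _ (fun a x => pvMaskA_len_aux s substr x a) arr).trans hlen) i,
        ih (by omega) arr hlen i]
    simp only [Int.toNat_natCast]
    constructor
    · rintro ((h | ⟨q, hq, hrest⟩) | ⟨u, hu, hcond⟩)
      · exact Or.inl h
      · exact Or.inr ⟨q, by omega, hrest⟩
      · exact Or.inr ⟨m, by omega, u, hu, hcond⟩
    · rintro (h | ⟨q, hq, u, hu, hcond⟩)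
      · exact Or.inl (Or.inl h)
      · by_cases hqm : q < m
        · exact Or.inl (Or.inr ⟨q, hqm, u, hu, hcond⟩)
        · have : q = m := by omega
          subst this
          exact Or.inr ⟨u, hu, hcond⟩

lemma pvG_maskA (s : List Char) (substr : List String) (i : Nat) (hi : i < s.length) :
    pvG (pvMaskA s substr) i ↔ pvCov s substr i := by
  unfold pvMaskA
  rw [pvG_maskA_aux s substr s.length le_rfl _ (by simp) i]
  have hrep : ¬ pvG (List.replicate s.length false) i := by
    unfold pvG
    by_cases h : i < s.length
    · rw [List.getElem?_eq_getElem (by simpa using h)]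
      simp
    · rw [List.getElem?_eq_none (by simpa using h)]
      simp
  constructor
  · rintro (h | ⟨q, _, u, hu, hcond⟩)
    · exact absurd h hrep
    · exact ⟨u, hu, q, hcond⟩
  · rintro ⟨u, hu, p, hpre, h1, h2⟩
    refine Or.inr ⟨p, ?_, u, hu, hpre, h1, h2⟩
    have h3 := hpre.length_le
    rw [List.length_drop] at h3
    omega

lemma pvMarkLoop_length (s t : List Char) (fuel : Nat) :
    ∀ (pos : Int) (arr : List Bool), (pvMarkLoop s t fuel pos arr).length = arr.length := by
  induction fuel with
  | zero => intro pos arr; rfl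
  | succ fuel ih =>
    intro pos arr
    unfold pvMarkLoop
    by_cases h : pos = -1
    · simp [h]
    · simp only [h, if_false]
      rw [ih, pv_foldl_length _ _ (fun a k => by simp)]

lemma pvG_markLoop (s t : List Char) (ht : t ≠ []) :
    ∀ (fuel k : Nat), k ≤ s.length → s.length + 1 - k ≤ fuel →
    ∀ (arr : List Bool), arr.length = s.length → ∀ i,
    (pvG (pvMarkLoop s t fuel (PySem.Chars.findFrom s t (k : Int) none) arr) i
      ↔ pvG arr i ∨ ∃ p : Nat, k ≤ p ∧ t <+: List.drop p s ∧ p ≤ i ∧ i < p + t.length) := by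
  intro fuel
  induction fuel with
  | zero =>
    intro k hk hfuel
    exact absurd hfuel (by omega)
  | succ fuel ih =>
    intro k hk hfuel arr hlen i
    by_cases hneg : PySem.Chars.findFrom s t (k : Int) none = -1
    · rw [pvMarkLoop_succ, if_pos hneg]
      have hno : ¬ t <:+: List.drop k s :=
        (PySem.Chars.findFrom_natCast_eq_neg_one_iff s t k hk).mp hneg
      constructor
      · exact Or.inl
      · rintro (h | ⟨p, hkp, hpre, _, _⟩)
        · exact h
        · exact absurd ((PySem.Chars.isIn_iff_infix _ _).mp
            ((PySem.Chars.exists_prefix_drop_iff_isIn t (List.drop k s)).mp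
              ⟨p - k, by rw [List.drop_drop, show k + (p - k) = p from by omega]; exact hpre⟩)) hno
    · obtain ⟨hkle, hpre0, hmin⟩ := PySem.Chars.findFrom_natCast_spec s t k hk hneg
      set r := PySem.Chars.findFrom s t (k : Int) none with hr
      have hr0 : (0 : Int) ≤ r := le_trans (by positivity) hkle
      have ht1 : 0 < t.length := List.length_pos_of_ne_nil ht
      have hplen : r.toNat + t.length ≤ s.length := by
        have h1 := hpre0.length_le
        rw [List.length_drop] at h1
        omega
      rw [pvMarkLoop_succ, if_neg hneg]
      rw [show r + 1 = ((r.toNat + 1 : Nat) : Int) from by omega,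
          ih (r.toNat + 1) (by omega) (by omega) _
            (by rw [pv_foldl_length _ _ (fun a k => by simp)]; exact hlen) i,
          pvG_setRangeB arr r hr0 t.length (by omega) i]
      constructor
      · rintro ((h | ⟨h1, h2⟩) | ⟨p, hp1, hp2⟩)
        · exact Or.inl h
        · exact Or.inr ⟨r.toNat, by omega, hpre0, h1, h2⟩
        · exact Or.inr ⟨p, by omega, hp2⟩
      · rintro (h | ⟨p, hkp, hpre, h1, h2⟩)
        · exact Or.inl (Or.inl h)
        · rcases lt_trichotomy p r.toNat with hc | hc | hc
          · exact absurd hpre (hmin p hkp hc)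
          · subst hc
            exact Or.inl (Or.inr ⟨h1, h2⟩)
          · exact Or.inr ⟨p, by omega, hpre, h1, h2⟩

lemma pvG_maskB_aux (s : List Char) (substr : List String) :
    ∀ (arr : List Bool), arr.length = s.length → ∀ i,
    (pvG (substr.foldl (fun mask text =>
        if text.toList = [] then mask
        else pvMarkLoop s text.toList (s.length + 1) (PySem.Chars.find s text.toList) mask)
        arr) i
      ↔ pvG arr i ∨ ∃ t ∈ substr, ∃ p : Nat,
          t.toList <+: List.drop p s ∧ p ≤ i ∧ i < p + t.toList.length) := by
  induction substr with
  | nil => intro arr _ i; simp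
  | cons t ts ih =>
    intro arr hlen i
    rw [List.foldl_cons]
    by_cases he : t.toList = []
    · rw [if_pos he, ih arr hlen i]
      constructor
      · rintro (h | ⟨u, hu, hcond⟩)
        · exact Or.inl h
        · exact Or.inr ⟨u, List.mem_cons_of_mem _ hu, hcond⟩
      · rintro (h | ⟨u, hu, hcond⟩)
        · exact Or.inl h
        · rcases List.mem_cons.mp hu with rfl | hu'
          · obtain ⟨p, _, h1, h2⟩ := hcond
            rw [he] at h2
            simp at h2
            omega
          · exact Or.inr ⟨u, hu', hcond⟩
    · rw [if_neg he,
          ih _ (by rw [pvMarkLoop_length]; exact hlen) i,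
          show PySem.Chars.find s t.toList = PySem.Chars.findFrom s t.toList ((0 : Nat) : Int) none
            from by rw [Nat.cast_zero, PySem.Chars.findFrom_zero],
          pvG_markLoop s t.toList he (s.length + 1) 0 (by omega) (by omega) arr hlen i]
      constructor
      · rintro ((h | ⟨p, _, hrest⟩) | ⟨u, hu, hcond⟩)
        · exact Or.inl h
        · exact Or.inr ⟨t, by simp, p, hrest⟩
        · exact Or.inr ⟨u, List.mem_cons_of_mem _ hu, hcond⟩
      · rintro (h | ⟨u, hu, hcond⟩)
        · exact Or.inl (Or.inl h)
        · rcases List.mem_cons.mp hu with rfl | hu'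
          · obtain ⟨p, hrest⟩ := hcond
            exact Or.inl (Or.inr ⟨p, by omega, hrest⟩)
          · exact Or.inr ⟨u, hu', hcond⟩

lemma pvG_maskB (s : List Char) (substr : List String) (i : Nat) :
    pvG (pvMaskB s substr) i ↔ pvCov s substr i := by
  unfold pvMaskB
  rw [pvG_maskB_aux s substr _ (by simp) i]
  have hrep : ¬ pvG (List.replicate s.length false) i := by
    unfold pvG
    by_cases h : i < s.length
    · rw [List.getElem?_eq_getElem (by simpa using h)]
      simp
    · rw [List.getElem?_eq_none (by simpa using h)]
      simp
  unfold pvCov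
  constructor
  · rintro (h | h)
    · exact absurd h hrep
    · exact h
  · exact Or.inr

lemma pvMaskA_length (s : List Char) (substr : List String) :
    (pvMaskA s substr).length = s.length := by
  unfold pvMaskA
  rw [pv_foldl_length _ _ (fun arr idx => pvMaskA_len_aux s substr idx arr)]
  exact List.length_replicate

lemma pvMaskB_length (s : List Char) (substr : List String) :
    (pvMaskB s substr).length = s.length := by
  unfold pvMaskB
  rw [pv_foldl_length]
  · exact List.length_replicate
  · intro a t
    by_cases h : t.toList = []
    · simp [h]
    · simp only [h, if_false]
      exact pvMarkLoop_length _ _ _ _ _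

lemma pvMask_eq (s : List Char) (substr : List String) :
    pvMaskA s substr = pvMaskB s substr := by
  apply List.ext_getElem?
  intro i
  by_cases hi : i < s.length
  · have hA := pvMaskA_length s substr
    have hB := pvMaskB_length s substr
    rw [List.getElem?_eq_getElem (by omega), List.getElem?_eq_getElem (by omega)]
    congr 1
    rw [Bool.eq_iff_iff]
    have h1 := pvG_maskA s substr i hi
    have h2 := pvG_maskB s substr i
    unfold pvG at h1 h2
    rw [List.getElem?_eq_getElem (by omega)] at h1 h2
    simp only [Option.getD_some] at h1 h2
    rw [h1, h2]
  · rw [List.getElem?_eq_none (by rw [pvMaskA_length]; omega),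
        List.getElem?_eq_none (by rw [pvMaskB_length]; omega)]

lemma pvEmit_eq (s : List Char) :
    ∀ (arr : List Bool) (k : Nat), k + arr.length ≤ s.length → ∀ acc,
    (PySem.List.enumerate arr (k : Int)).foldl (pvEmitStepA s) acc
      = (List.zip arr (List.drop k s)).foldl pvEmitStepB acc := by
  intro arr
  induction arr with
  | nil => intro k h acc; rfl
  | cons f fs ih =>
    intro k h acc
    have hk : k < s.length := by
      simp only [List.length_cons] at h
      omega
    rw [PySem.List.enumerate_cons, ← List.getElem_cons_drop hk, List.zip_cons_cons,
        List.foldl_cons, List.foldl_cons]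
    have hg : PySem.List.pyGetD s ((k : Nat) : Int) ' ' = s[k] := by
      rw [PySem.List.pyGetD_natCast]
      exact List.getD_eq_getElem s ' ' hk
    have hstep : pvEmitStepA s acc (((k : Nat) : Int), f) = pvEmitStepB acc (f, s[k]) := by
      obtain ⟨res, bold⟩ := acc
      unfold pvEmitStepA pvEmitStepB
      cases f <;> cases bold <;> simp [hg, List.append_assoc]
    rw [hstep, show ((k : Nat) : Int) + 1 = ((k + 1 : Nat) : Int) from by omega,
        ih (k + 1) (by simp only [List.length_cons] at h; omega)]

-- ===== VERDICT (by name: the statement is the Claim_ definition above) =====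
theorem embolden_substrings_spec : Claim_equal_embolden_substrings := by
  intro mystr substr _
  unfold Spec_embolden_substrings embolden_substrings embolden_substrings_alt
  have hmask := pvMask_eq mystr.toList substr
  have hlen := pvMaskB_length mystr.toList substr
  have hemit := pvEmit_eq mystr.toList (pvMaskB mystr.toList substr) 0 (by omega) ([], false)
  simp only [hmask]
  rw [show ((0 : Int) = ((0 : Nat) : Int)) from rfl, hemit, List.drop_zero]
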